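-- pv_equiv track=rewrite | github.com/docxology/MetaInformAnt | src/metainformant/quality/analysis/contamination.py | detect_mycoplasma_contamination
-- ===== SOURCE A (Python) =====
-- from typing import Any, Dict, List, Optional, Set, Tuple
--
-- def detect_mycoplasma_contamination(
--     sequences: List[str],
--     mycoplasma_genome: Optional[str] = None,
-- ) -> Dict[str, Any]:
--     """Detect mycoplasma contamination. Returns {seq_idx: True}."""
--     patterns = ['TTAAATTTAAATTT', 'AAATTTAAATTTAAATTT']
--     results: Dict[str, Any] = {}
--     for idx, seq in enumerate(sequences):
--         detected = False
--         if mycoplasma_genome: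
--             if seq in mycoplasma_genome or mycoplasma_genome in seq:
--                 detected = True
--             elif len(seq) >= 8:
--                 for k in range(min(len(seq), len(mycoplasma_genome)), 7, -1):
--                     for start in range(len(seq) - k + 1):
--                         if seq[start:start + k] in mycoplasma_genome:
--                             detected = True
--                             break
--                     if detected:
--                         break
--         if not detected:
--             for pattern in patterns:
--                 if pattern in seq:
--                     detected = True
--                     break
--         if detected:
--             results[str(idx)] = True
--     return results
-- ===== SOURCE B (Python) =====
-- def detect_mycoplasma_contamination(sequences, mycoplasma_genome=None):
--     """Detect mycoplasma contamination. Returns {seq_idx: True}."""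
--     patterns = ['TTAAATTTAAATTT', 'AAATTTAAATTTAAATTT']
--     kmers = set()
--     if mycoplasma_genome:
--         g = mycoplasma_genome
--         kmers = {g[i:i + 8] for i in range(len(g) - 7)}
--     results = {}
--     for idx, seq in enumerate(sequences):
--         if mycoplasma_genome and (
--             seq in mycoplasma_genome
--             or mycoplasma_genome in seq
--             or any(seq[i:i + 8] in kmers for i in range(len(seq) - 7))
--         ):
--             detected = True
--         else:
--             detected = any(p in seq for p in patterns)
--         if detected:
--             results[str(idx)] = True
--     return results
-- ===== Notes on version B (the rewrite author's own statement) =====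
-- stated objective: alternative
-- what changed: A scans, per sequence, every substring of every length from min(len(seq),len(genome)) down to 8 and tests each against the genome; B precomputes the genome's 8-mer set once and tests only each sequence's 8-mer windows (plus the two whole-string containment checks), which is equivalent because a shared substring of length >= 8 exists iff a shared 8-mer does.
import Mathlib
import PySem

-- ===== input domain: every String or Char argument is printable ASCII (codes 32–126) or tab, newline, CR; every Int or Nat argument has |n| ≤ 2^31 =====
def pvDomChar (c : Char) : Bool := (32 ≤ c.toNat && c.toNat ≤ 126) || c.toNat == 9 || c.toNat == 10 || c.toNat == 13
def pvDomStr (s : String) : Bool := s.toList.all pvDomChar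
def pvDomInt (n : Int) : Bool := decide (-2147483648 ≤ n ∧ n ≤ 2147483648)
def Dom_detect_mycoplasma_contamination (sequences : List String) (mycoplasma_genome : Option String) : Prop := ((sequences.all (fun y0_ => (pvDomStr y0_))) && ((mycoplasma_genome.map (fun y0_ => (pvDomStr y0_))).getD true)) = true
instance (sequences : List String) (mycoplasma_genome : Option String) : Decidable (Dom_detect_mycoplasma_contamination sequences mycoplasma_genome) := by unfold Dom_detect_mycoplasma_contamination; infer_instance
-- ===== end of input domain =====

-- B replaces A's per-sequence scan over all substrings of every length ≥ 8 by one precomputed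
-- set of the genome's 8-mers, checking only each sequence's 8-mer windows (equivalent because a
-- shared substring of length ≥ 8 exists iff a shared 8-mer does); objective: alternative.

-- ===== PORT A =====
def pvPatterns : List String := ["TTAAATTTAAATTT", "AAATTTAAATTTAAATTT"]

-- A's nested loop: for k in range(min(len(seq), len(g)), 7, -1): for start in range(len(seq)-k+1): …
def pvScanA (s g : List Char) : Bool :=
  (PySem.List.pyRange (min (s.length : Int) (g.length : Int)) 7 (-1)).foldl
    (fun det k =>
      if det then det
      else (PySem.List.pyRange 0 ((s.length : Int) - k + 1) 1).foldl
        (fun det2 start =>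
          if det2 then det2
          else PySem.Chars.isIn (PySem.List.slice s (some start) (some (start + k))) g)
        det)
    false

def detect_mycoplasma_contamination (sequences : List String) (mycoplasma_genome : Option String) : List (String × Bool) :=
  (PySem.List.enumerate sequences 0).foldl
    (fun (results : PySem.Dict String Bool) p =>
      let detected : Bool :=
        match mycoplasma_genome with
        | some g =>
          if g.toList.isEmpty then false
          else if PySem.Str.isIn p.2 g || PySem.Str.isIn g p.2 then true
          else if 8 ≤ p.2.toList.length then pvScanA p.2.toList g.toList else false
        | none => false
      let detected2 : Bool :=
        if !detected then
          pvPatterns.foldl (fun d pat => if d then d else PySem.Str.isIn pat p.2) detected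
        else detected
      if detected2 then PySem.Dict.insert results (PySem.Int.toStr p.1) true else results)
    PySem.Dict.empty |>.items

-- ===== PORT B =====
-- kmers = {g[i:i+8] for i in range(len(g) - 7)}
def pvKmers (g : List Char) : PySem.Set (List Char) :=
  PySem.Set.ofList ((PySem.List.pyRange 0 ((g.length : Int) - 7) 1).map
    (fun i => PySem.List.slice g (some i) (some (i + 8))))

def detect_mycoplasma_contamination_alt (sequences : List String) (mycoplasma_genome : Option String) : List (String × Bool) :=
  let km : PySem.Set (List Char) :=
    match mycoplasma_genome with
    | some g => if !g.toList.isEmpty then pvKmers g.toList else PySem.Set.empty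
    | none => PySem.Set.empty
  (PySem.List.enumerate sequences 0).foldl
    (fun (results : PySem.Dict String Bool) p =>
      let detected : Bool :=
        match mycoplasma_genome with
        | some g =>
          if !g.toList.isEmpty &&
             (PySem.Str.isIn p.2 g || PySem.Str.isIn g p.2 ||
              (PySem.List.pyRange 0 ((p.2.toList.length : Int) - 7) 1).any
                (fun i => km.contains (PySem.List.slice p.2.toList (some i) (some (i + 8)))))
          then true
          else pvPatterns.any (fun pat => PySem.Str.isIn pat p.2)
        | none => pvPatterns.any (fun pat => PySem.Str.isIn pat p.2)
      if detected then PySem.Dict.insert results (PySem.Int.toStr p.1) true else results)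
    PySem.Dict.empty |>.items

-- ===== PRECONDITION & SPEC =====
def Spec_detect_mycoplasma_contamination (sequences : List String) (mycoplasma_genome : Option String) (out : List (String × Bool)) : Prop := out = detect_mycoplasma_contamination_alt sequences mycoplasma_genome
instance (sequences : List String) (mycoplasma_genome : Option String) (out : List (String × Bool)) : Decidable (Spec_detect_mycoplasma_contamination sequences mycoplasma_genome out) := by unfold Spec_detect_mycoplasma_contamination; infer_instance

-- ===== CLAIM (what is proved, stated in full; the proofs are below) =====
def Claim_equal_detect_mycoplasma_contamination : Prop := ∀ (sequences : List String) (mycoplasma_genome : Option String), Dom_detect_mycoplasma_contamination sequences mycoplasma_genome → Spec_detect_mycoplasma_contamination sequences mycoplasma_genome (detect_mycoplasma_contamination sequences mycoplasma_genome)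

-- ===== LEMMAS AND PROOFS =====

-- a for-loop that sets a flag and breaks: foldl with an 'if det then det' step is 'init || any'
theorem pv_foldl_break {α : Type} (l : List α) (f' : Bool → α → Bool) (f : α → Bool)
    (hf : ∀ x, f' false x = f x) (b : Bool) :
    l.foldl (fun d x => if d then d else f' d x) b = (b || l.any f) := by
  induction l generalizing b with
  | nil => cases b <;> simp
  | cons x t ih => cases b <;> simp [ih, hf]

-- a window of length ≥ 8 of s occurs in g iff an 8-mer of s equals an 8-mer of g
theorem pv_window_iff (s g : List Char) :
    (∃ k : Nat, 8 ≤ k ∧ (k : Int) ≤ min (s.length : Int) (g.length : Int) ∧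
      ∃ t : Nat, t + k ≤ s.length ∧ ((s.drop t).take k) <:+: g)
    ↔ (∃ i : Nat, i + 8 ≤ s.length ∧ ∃ j : Nat, j + 8 ≤ g.length ∧
        (s.drop i).take 8 = (g.drop j).take 8) := by
  constructor
  · rintro ⟨k, hk8, hkmin, t, htk, p, q, hpq⟩
    have hkg : k ≤ g.length := by
      have := le_min_iff.mp hkmin
      exact_mod_cast this.2
    refine ⟨t, by omega, p.length, ?_, ?_⟩
    · have hlen : g.length = p.length + ((s.drop t).take k).length + q.length := by
        rw [← hpq]; simp [List.length_append]; omega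
      have hwl : ((s.drop t).take k).length = k := by
        simp [List.length_take, List.length_drop]; omega
      omega
    · have hdrop : g.drop p.length = (s.drop t).take k ++ q := by
        rw [← hpq, List.append_assoc, List.drop_left]
      have hpre : (s.drop t).take 8 <+: g.drop p.length := by
        rw [hdrop]
        have h1 : (s.drop t).take 8 <+: (s.drop t).take k := by
          have h := List.take_prefix 8 ((s.drop t).take k)
          rwa [List.take_take, Nat.min_eq_left hk8] at h
        exact h1.trans (List.prefix_append _ _)
      have hl8 : ((s.drop t).take 8).length = 8 := by
        simp [List.length_take, List.length_drop]; omega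
      have := List.prefix_iff_eq_take.mp hpre
      rw [this, hl8]
  · rintro ⟨i, hi, j, hj, heq⟩
    refine ⟨8, le_refl 8, ?_, i, hi, ?_⟩
    · have h1 : (8 : Int) ≤ (s.length : Int) := by exact_mod_cast (by omega : 8 ≤ s.length)
      have h2 : (8 : Int) ≤ (g.length : Int) := by exact_mod_cast (by omega : 8 ≤ g.length)
      exact le_min h1 h2
    · rw [heq]
      exact ((List.take_prefix _ _).isInfix).trans (List.drop_suffix j g).isInfix
  
-- membership in the k-mer set is "equal to some 8-mer of g"
theorem pv_mem_kmers (g w : List Char) :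
    (pvKmers g).contains w = true ↔ ∃ j : Nat, j + 8 ≤ g.length ∧ w = (g.drop j).take 8 := by
  have h0 : (pvKmers g).contains w = true ↔
      ∃ x ∈ PySem.List.pyRange 0 ((g.length : Int) - 7) 1,
        PySem.List.slice g (some x) (some (x + 8)) = w := by
    simp [pvKmers, PySem.Set.mem_ofList, List.mem_map, eq_comm]
  rw [h0]
  constructor
  · rintro ⟨x, hx, hw⟩
    rw [PySem.List.mem_pyRange_one] at hx
    obtain ⟨hx0, hxlt⟩ := hx
    refine ⟨x.toNat, by omega, ?_⟩
    rw [← hw, PySem.List.slice_toNat g hx0 (by omega)]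
    congr 1; omega
  · rintro ⟨j, hj, hw⟩
    refine ⟨(j : Int), ?_, ?_⟩
    · rw [PySem.List.mem_pyRange_one]; omega
    · rw [PySem.List.slice_toNat g (by omega) (by omega), hw]
      congr 1
      omega

-- A's descending scan over all window lengths ≥ 8 equals B's 8-mer-set membership test
theorem pv_scan_eq (s g : List Char) :
    (if 8 ≤ s.length then pvScanA s g else false)
    = (PySem.List.pyRange 0 ((s.length : Int) - 7) 1).any
        (fun i => (pvKmers g).contains (PySem.List.slice s (some i) (some (i + 8)))) := by
  by_cases h : 8 ≤ s.length
  · rw [if_pos h]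
    unfold pvScanA
    rw [pv_foldl_break _ _
        (fun k => (PySem.List.pyRange 0 ((s.length : Int) - k + 1) 1).any
          (fun st => PySem.Chars.isIn (PySem.List.slice s (some st) (some (st + k))) g))
        (fun k => by
          rw [pv_foldl_break _ _ _ (fun _ => rfl) false, Bool.false_or]) false,
      Bool.false_or]
    apply Bool.coe_iff_coe.mp
    simp only [List.any_eq_true, PySem.List.mem_pyRange_neg_one, PySem.List.mem_pyRange_one]
    constructor
    · rintro ⟨k, ⟨hk7, hkmin⟩, st, ⟨hst0, hstlt⟩, hin⟩
      rw [PySem.List.slice_toNat s hst0 (by omega)] at hin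
      have hkk : (st + k).toNat - st.toNat = k.toNat := by omega
      rw [hkk, PySem.Chars.isIn_iff_infix] at hin
      obtain ⟨i, hi, j, hj, heq⟩ := (pv_window_iff s g).mp
        ⟨k.toNat, by omega, by omega, st.toNat, by omega, hin⟩
      refine ⟨(i : Int), ⟨by omega, by omega⟩, ?_⟩
      apply (pv_mem_kmers g _).mpr
      refine ⟨j, hj, ?_⟩
      rw [PySem.List.slice_toNat s (by omega) (by omega)]
      have h8' : ((i : Int) + 8).toNat - ((i : Int)).toNat = 8 := by omega
      have hi' : ((i : Int)).toNat = i := by omega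
      rw [h8', hi', heq]
    · rintro ⟨i, ⟨hi0, hilt⟩, hctn⟩
      obtain ⟨j, hj, heq⟩ := (pv_mem_kmers g _).mp hctn
      rw [PySem.List.slice_toNat s hi0 (by omega)] at heq
      have h8' : (i + 8).toNat - i.toNat = 8 := by omega
      rw [h8'] at heq
      obtain ⟨k, hk8, hkmin, t, htk, hinf⟩ := (pv_window_iff s g).mpr
        ⟨i.toNat, by omega, j, hj, heq⟩
      refine ⟨(k : Int), ⟨by omega, by omega⟩, (t : Int), ⟨by omega, by omega⟩, ?_⟩
      rw [PySem.List.slice_toNat s (by omega) (by omega)]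
      have hkk : ((t : Int) + k).toNat - ((t : Int)).toNat = k := by omega
      have ht' : ((t : Int)).toNat = t := by omega
      rw [hkk, ht', PySem.Chars.isIn_iff_infix]
      exact hinf
  · rw [if_neg h, PySem.List.pyRange_one_eq_nil (by omega)]
    simp

-- the two pattern loops agree
theorem pv_pattern_eq (seq : String) :
    pvPatterns.foldl (fun d pat => if d then d else PySem.Str.isIn pat seq) false
    = pvPatterns.any (fun pat => PySem.Str.isIn pat seq) := by
  rw [pv_foldl_break _ _ _ (fun _ => rfl) false, Bool.false_or]

-- ===== VERDICT (by name: the statement is the Claim_ definition above) =====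
theorem detect_mycoplasma_contamination_spec : Claim_equal_detect_mycoplasma_contamination := by
  intro sequences mycoplasma_genome _hdom
  unfold Spec_detect_mycoplasma_contamination
  unfold detect_mycoplasma_contamination detect_mycoplasma_contamination_alt
  cases mycoplasma_genome with
  | none =>
    simp only []
    congr 1
    apply congrFun
    apply congrFun
    apply congrArg
    funext results p
    rw [pv_pattern_eq]
    simp
  | some g =>
    congr 1
    apply congrFun
    apply congrFun
    apply congrArg
    funext results p
    by_cases hemp : g.toList.isEmpty
    · simp only [hemp, reduceIte, Bool.not_true, Bool.false_and, Bool.not_false]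
      rw [pv_pattern_eq]
      simp
    · rw [Bool.not_eq_true] at hemp
      simp only [hemp, reduceIte, Bool.not_false, Bool.true_and]
      by_cases hc : (PySem.Str.isIn p.2 g || PySem.Str.isIn g p.2) = true
      · simp only [hc, Bool.true_or, reduceIte]
        simp
      · rw [Bool.not_eq_true] at hc
        simp only [hc, Bool.false_or]
        rw [← pv_scan_eq p.2.toList g.toList]
        cases hscan : (if 8 ≤ p.2.toList.length then pvScanA p.2.toList g.toList else false) with
        | false =>
          simp only [Bool.false_eq_true, if_false, if_true, Bool.not_false]
          rw [pv_pattern_eq]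
        | true =>
          simp
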